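-- pv_equiv track=rewrite | github.com/delfu/advent2019 | 6.py | jumps_to_ancestors
-- ===== SOURCE A (Python) =====
-- def jumps_to_ancestors(star_map, satellite, terminator, cache):
--     if satellite in cache:
--         return cache[satellite]
--     if satellite not in star_map or satellite == terminator:
--         cache[satellite] = 0
--     else:
--         cache[satellite] = 1 + jumps_to_ancestors(
--             star_map, star_map[satellite], terminator, cache
--         )
--     return cache[satellite]
-- ===== SOURCE B (Python) =====
-- def jumps_to_ancestors(star_map, satellite, terminator, cache):
--     if satellite in cache:
--         return cache[satellite]
--     # walk up the parent chain collecting uncached nodes until a stopping node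
--     path = []
--     cur = satellite
--     while cur not in cache and cur in star_map and cur != terminator:
--         path.append(cur)
--         cur = star_map[cur]
--     if cur in cache:
--         val = cache[cur]
--     else:
--         cache[cur] = 0
--         val = 0
--     # back-fill: memoize every collected node, nearest-to-stop first
--     for node in reversed(path):
--         val += 1
--         cache[node] = val
--     return cache[satellite]
-- ===== Notes on version B (the rewrite author's own statement) =====
-- stated objective: alternative
-- what changed: Replaces the memoized recursion by an iterative two-phase algorithm: an upward walk collecting the uncached chain, then a back-fill loop writing base+distance into the cache for each collected node (same cache writes in the same order, no recursion).
import Mathlib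
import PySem

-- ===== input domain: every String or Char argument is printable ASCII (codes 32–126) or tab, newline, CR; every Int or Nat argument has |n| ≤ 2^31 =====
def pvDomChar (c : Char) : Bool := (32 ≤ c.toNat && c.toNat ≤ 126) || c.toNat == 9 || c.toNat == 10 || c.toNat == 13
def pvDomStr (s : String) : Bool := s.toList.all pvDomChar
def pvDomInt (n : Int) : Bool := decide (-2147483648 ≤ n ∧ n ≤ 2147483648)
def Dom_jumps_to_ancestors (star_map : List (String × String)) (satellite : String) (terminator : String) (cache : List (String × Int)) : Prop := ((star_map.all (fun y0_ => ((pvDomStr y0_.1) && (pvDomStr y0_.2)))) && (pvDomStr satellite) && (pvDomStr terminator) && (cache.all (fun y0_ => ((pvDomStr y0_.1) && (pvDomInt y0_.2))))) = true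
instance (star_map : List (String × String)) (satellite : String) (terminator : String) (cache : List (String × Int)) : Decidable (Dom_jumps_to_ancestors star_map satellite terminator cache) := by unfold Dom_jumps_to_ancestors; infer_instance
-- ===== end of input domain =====

-- B replaces A's memoized recursion by an iterative upward walk plus a back-fill loop;
-- both perform the identical cache mutations, and the proved claim is about the return value.


-- ===== PORT A =====
-- A's recursion, fueled to make it total in Lean (fuel exhaustion = none; excluded by Pre_).
-- Threads the cache dict as state; returns (cache[satellite], updated cache).
def pvGoA (sm : PySem.Dict String String) (term : String) :
    Nat → String → PySem.Dict String Int → Option (Int × PySem.Dict String Int)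
  | 0, _, _ => none
  | fuel + 1, sat, cache =>
    match PySem.Dict.get? cache sat with
    | some v => some (v, cache)                              -- if satellite in cache: return cache[satellite]
    | none =>
      if (PySem.Dict.get? sm sat).isNone || sat == term then -- satellite not in star_map or satellite == terminator
        let c := PySem.Dict.insert cache sat 0               -- cache[satellite] = 0
        some ((PySem.Dict.get? c sat).getD 0, c)             -- return cache[satellite]
      else
        match pvGoA sm term fuel ((PySem.Dict.get? sm sat).getD "") cache with
        | none => none
        | some (v, c1) =>
          let c2 := PySem.Dict.insert c1 sat (1 + v)         -- cache[satellite] = 1 + recursive call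
          some ((PySem.Dict.get? c2 sat).getD 0, c2)         -- return cache[satellite]

def jumps_to_ancestors (star_map : List (String × String)) (satellite : String) (terminator : String) (cache : List (String × Int)) : Int :=
  match pvGoA (PySem.Dict.ofList star_map) terminator (star_map.length + 1) satellite (PySem.Dict.ofList cache) with
  | some (v, _) => v
  | none => 0

-- ===== PORT B =====
-- Source B's while-loop: walk up collecting uncached nodes; returns (path, stopping node).
def pvWalkB (sm : PySem.Dict String String) (term : String) :
    Nat → String → PySem.Dict String Int → Option (List String × String)
  | 0, _, _ => none
  | fuel + 1, cur, cache =>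
    if (PySem.Dict.get? cache cur).isNone && (PySem.Dict.get? sm cur).isSome && !(cur == term) then
      match pvWalkB sm term fuel ((PySem.Dict.get? sm cur).getD "") cache with
      | none => none
      | some (path, stop) => some (cur :: path, stop)
    else
      some ([], cur)

-- Source B's 'if cur in cache: val = cache[cur] else: cache[cur] = 0; val = 0'
def pvBaseB (cur : String) (cache : PySem.Dict String Int) : Int × PySem.Dict String Int :=
  match PySem.Dict.get? cache cur with
  | some v => (v, cache)
  | none => (0, PySem.Dict.insert cache cur 0)

-- Source B's back-fill loop: 'for node in reversed(path): val += 1; cache[node] = val'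
def pvFillB (stop : String) (path : List String) (cache : PySem.Dict String Int) : Int × PySem.Dict String Int :=
  path.reverse.foldl (fun p node => (p.1 + 1, PySem.Dict.insert p.2 node (p.1 + 1))) (pvBaseB stop cache)

def jumps_to_ancestors_alt (star_map : List (String × String)) (satellite : String) (terminator : String) (cache : List (String × Int)) : Int :=
  let smd := PySem.Dict.ofList star_map
  let cd := PySem.Dict.ofList cache
  match PySem.Dict.get? cd satellite with
  | some v => v                                              -- early cached return
  | none =>
    match pvWalkB smd terminator (star_map.length + 1) satellite cd with
    | none => 0
    | some (path, stop) =>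
      ((PySem.Dict.get? (pvFillB stop path cd).2 satellite).getD 0)   -- return cache[satellite]

-- ===== PRECONDITION & SPEC =====
-- the k-th ancestor of s under the parent map (identity step once s leaves the map)
def pvAnc (sm : PySem.Dict String String) : String → Nat → String
  | s, 0 => s
  | s, k + 1 => pvAnc sm ((PySem.Dict.get? sm s).getD s) k

-- a node at which the recursion stops: already cached, absent from the map, or the terminator
def pvStop (sm : PySem.Dict String String) (term : String) (cd : PySem.Dict String Int) (s : String) : Bool :=
  (PySem.Dict.get? cd s).isSome || (PySem.Dict.get? sm s).isNone || s == term

-- Pre_ excludes exactly the cyclic parent chains on which Python A raises RecursionError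
-- (and never returns); a stopping chain always stops within star_map.length steps.
def Pre_jumps_to_ancestors (star_map : List (String × String)) (satellite : String) (terminator : String) (cache : List (String × Int)) : Prop :=
  (List.range (star_map.length + 1)).any
    (fun k => pvStop (PySem.Dict.ofList star_map) terminator (PySem.Dict.ofList cache)
      (pvAnc (PySem.Dict.ofList star_map) satellite k)) = true

instance (star_map : List (String × String)) (satellite : String) (terminator : String) (cache : List (String × Int)) : Decidable (Pre_jumps_to_ancestors star_map satellite terminator cache) := by unfold Pre_jumps_to_ancestors; infer_instance

def pvWitness_jumps_to_ancestors : (List (String × String)) × String × String × (List (String × Int)) :=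
  ([("B", "A"), ("C", "B")], "C", "A", [])

def Spec_jumps_to_ancestors (star_map : List (String × String)) (satellite : String) (terminator : String) (cache : List (String × Int)) (out : Int) : Prop := out = jumps_to_ancestors_alt star_map satellite terminator cache
instance (star_map : List (String × String)) (satellite : String) (terminator : String) (cache : List (String × Int)) (out : Int) : Decidable (Spec_jumps_to_ancestors star_map satellite terminator cache out) := by unfold Spec_jumps_to_ancestors; infer_instance

-- ===== CLAIM (what is proved, stated in full; the proofs are below) =====
def Claim_equal_jumps_to_ancestors : Prop := ∀ (star_map : List (String × String)) (satellite : String) (terminator : String) (cache : List (String × Int)), Dom_jumps_to_ancestors star_map satellite terminator cache → Pre_jumps_to_ancestors star_map satellite terminator cache → Spec_jumps_to_ancestors star_map satellite terminator cache (jumps_to_ancestors star_map satellite terminator cache)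

-- ===== LEMMAS AND PROOFS =====

-- back-fill over one more collected node = one more step applied to the shorter fill
theorem pvFillB_cons (stop sat : String) (path : List String) (cache : PySem.Dict String Int) :
    pvFillB stop (sat :: path) cache =
      ((pvFillB stop path cache).1 + 1,
       PySem.Dict.insert (pvFillB stop path cache).2 sat ((pvFillB stop path cache).1 + 1)) := by
  simp [pvFillB, List.reverse_cons, List.foldl_append]

-- one step of B's walk: the loop condition fails / succeeds
theorem pvWalkB_stop (sm : PySem.Dict String String) (term : String) (fuel : Nat)
    (cur : String) (cache : PySem.Dict String Int)
    (h : ((PySem.Dict.get? cache cur).isNone && (PySem.Dict.get? sm cur).isSome && !(cur == term)) = false) :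
    pvWalkB sm term (fuel + 1) cur cache = some ([], cur) := by
  simp only [pvWalkB, h]
  simp

theorem pvWalkB_go (sm : PySem.Dict String String) (term : String) (fuel : Nat)
    (cur : String) (cache : PySem.Dict String Int) (path : List String) (stop : String)
    (h : ((PySem.Dict.get? cache cur).isNone && (PySem.Dict.get? sm cur).isSome && !(cur == term)) = true)
    (hrec : pvWalkB sm term fuel ((PySem.Dict.get? sm cur).getD "") cache = some (path, stop)) :
    pvWalkB sm term (fuel + 1) cur cache = some (cur :: path, stop) := by
  simp only [pvWalkB, h, hrec]
  simp

-- A's fueled recursion, when it returns, is computed by B's walk + back-fill from the same cache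
theorem pvGoA_eq_walk (sm : PySem.Dict String String) (term : String) :
    ∀ (fuel : Nat) (sat : String) (cache : PySem.Dict String Int) (v : Int) (c : PySem.Dict String Int),
      pvGoA sm term fuel sat cache = some (v, c) →
      (match PySem.Dict.get? cache sat with
       | some w => v = w ∧ c = cache
       | none => ∃ path stop, pvWalkB sm term fuel sat cache = some (path, stop) ∧
           pvFillB stop path cache = (v, c) ∧ PySem.Dict.get? c sat = some v) := by
  intro fuel
  induction fuel with
  | zero => intro sat cache v c h; simp [pvGoA] at h
  | succ f ih =>
    intro sat cache v c h
    cases hc : PySem.Dict.get? cache sat with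
    | some w =>
      simp only [pvGoA, hc] at h
      simp only [Option.some.injEq, Prod.mk.injEq] at h
      exact ⟨h.1.symm, h.2.symm⟩
    | none =>
      by_cases hs : ((PySem.Dict.get? sm sat).isNone || sat == term) = true
      · -- stop at sat itself
        simp only [pvGoA, hc, hs, if_pos] at h
        have hvc : v = 0 ∧ c = PySem.Dict.insert cache sat 0 := by
          simp only [PySem.Dict.get?_insert_self, Option.getD_some, Option.some.injEq,
            Prod.mk.injEq] at h
          exact ⟨h.1.symm, h.2.symm⟩
        obtain ⟨rfl, rfl⟩ := hvc
        refine ⟨[], sat, ?_, ?_, ?_⟩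
        · refine pvWalkB_stop sm term f sat cache ?_
          cases h1 : (PySem.Dict.get? sm sat).isNone <;> cases h2 : (sat == term) <;>
            simp_all
        · simp [pvFillB, pvBaseB, hc]
        · rw [PySem.Dict.get?_insert_self]
      · -- recursive case
        simp only [pvGoA, hc, hs, if_neg, Bool.not_eq_true] at h
        cases hrec : pvGoA sm term f ((PySem.Dict.get? sm sat).getD "") cache with
        | none => rw [hrec] at h; simp at h
        | some pr =>
          obtain ⟨v', c1⟩ := pr
          rw [hrec] at h
          simp only [PySem.Dict.get?_insert_self, Option.getD_some, Option.some.injEq,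
            Prod.mk.injEq] at h
          obtain ⟨hv, hcv⟩ := h
          have hv' : v = v' + 1 := by omega
          have hc' : c = PySem.Dict.insert c1 sat (v' + 1) := by
            rw [← hcv]; congr 1; omega
          subst hv' hc'
          have hfpos : f ≠ 0 := by
            intro h0; rw [h0] at hrec; simp [pvGoA] at hrec
          obtain ⟨f', rfl⟩ : ∃ f', f = f' + 1 := ⟨f - 1, by omega⟩
          have hcond : ((PySem.Dict.get? cache sat).isNone && (PySem.Dict.get? sm sat).isSome
              && !(sat == term)) = true := by
            cases h1 : (PySem.Dict.get? sm sat).isNone <;> cases h2 : (sat == term) <;>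
              simp_all
          have ihp := ih ((PySem.Dict.get? sm sat).getD "") cache v' c1 hrec
          cases hcp : PySem.Dict.get? cache ((PySem.Dict.get? sm sat).getD "") with
          | some w =>
            rw [hcp] at ihp
            obtain ⟨hvw, hc1⟩ := ihp
            have hwalkp : pvWalkB sm term (f' + 1) ((PySem.Dict.get? sm sat).getD "") cache
                = some ([], (PySem.Dict.get? sm sat).getD "") := by
              refine pvWalkB_stop sm term f' _ cache ?_
              simp [hcp]
            refine ⟨[sat], (PySem.Dict.get? sm sat).getD "", ?_, ?_, ?_⟩
            · exact pvWalkB_go sm term (f' + 1) sat cache [] _ hcond hwalkp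
            · rw [pvFillB_cons]
              have hbase : pvFillB ((PySem.Dict.get? sm sat).getD "") [] cache = (w, cache) := by
                simp [pvFillB, pvBaseB, hcp]
              rw [hbase, hvw, hc1]
            · rw [PySem.Dict.get?_insert_self]
          | none =>
            rw [hcp] at ihp
            obtain ⟨path', stop, hwalk', hfill', hget'⟩ := ihp
            refine ⟨sat :: path', stop, ?_, ?_, ?_⟩
            · exact pvWalkB_go sm term (f' + 1) sat cache path' stop hcond hwalk'
            · rw [pvFillB_cons, hfill']
            · rw [PySem.Dict.get?_insert_self]

-- if the parent chain stops within k steps, A's recursion returns with any fuel > k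
theorem pvGoA_total (sm : PySem.Dict String String) (term : String) (cd : PySem.Dict String Int) :
    ∀ (k : Nat) (sat : String) (fuel : Nat),
      pvStop sm term cd (pvAnc sm sat k) = true → k < fuel →
      (pvGoA sm term fuel sat cd).isSome := by
  intro k
  induction k with
  | zero =>
    intro sat fuel hstop hlt
    obtain ⟨f, rfl⟩ : ∃ f, fuel = f + 1 := ⟨fuel - 1, by omega⟩
    simp only [pvAnc] at hstop
    cases hc : PySem.Dict.get? cd sat with
    | some w => simp [pvGoA, hc]
    | none =>
      have hs : ((PySem.Dict.get? sm sat).isNone || sat == term) = true := by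
        simp only [pvStop, hc] at hstop; simpa using hstop
      simp [pvGoA, hc, hs]
  | succ j ih =>
    intro sat fuel hstop hlt
    obtain ⟨f, rfl⟩ : ∃ f, fuel = f + 1 := ⟨fuel - 1, by omega⟩
    cases hc : PySem.Dict.get? cd sat with
    | some w => simp [pvGoA, hc]
    | none =>
      by_cases hs : ((PySem.Dict.get? sm sat).isNone || sat == term) = true
      · simp [pvGoA, hc, hs]
      · have hsm : (PySem.Dict.get? sm sat).isSome = true := by
          cases h1 : (PySem.Dict.get? sm sat) <;> simp_all
        have hanc : pvAnc sm sat (j + 1) = pvAnc sm ((PySem.Dict.get? sm sat).getD "") j := by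
          cases h1 : PySem.Dict.get? sm sat with
          | none => rw [h1] at hsm; simp at hsm
          | some p => simp [pvAnc, h1]
        rw [hanc] at hstop
        have := ih ((PySem.Dict.get? sm sat).getD "") f hstop (by omega)
        cases hrec : pvGoA sm term f ((PySem.Dict.get? sm sat).getD "") cd with
        | none => rw [hrec] at this; simp at this
        | some pr => simp [pvGoA, hc, hs, hrec]

-- ===== VERDICT (by name: the statement is the Claim_ definition above) =====
theorem jumps_to_ancestors_spec : Claim_equal_jumps_to_ancestors := by
  intro star_map satellite terminator cache _hdom hpre
  unfold Spec_jumps_to_ancestors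
  unfold Pre_jumps_to_ancestors at hpre
  rw [List.any_eq_true] at hpre
  obtain ⟨k, hk, hstop⟩ := hpre
  rw [List.mem_range] at hk
  have hsome := pvGoA_total (PySem.Dict.ofList star_map) terminator (PySem.Dict.ofList cache)
    k satellite (star_map.length + 1) hstop hk
  cases hgo : pvGoA (PySem.Dict.ofList star_map) terminator (star_map.length + 1) satellite
      (PySem.Dict.ofList cache) with
  | none => rw [hgo] at hsome; simp at hsome
  | some pr =>
    obtain ⟨v, c⟩ := pr
    have hmain := pvGoA_eq_walk (PySem.Dict.ofList star_map) terminator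
      (star_map.length + 1) satellite (PySem.Dict.ofList cache) v c hgo
    cases hc : PySem.Dict.get? (PySem.Dict.ofList cache) satellite with
    | some w =>
      rw [hc] at hmain
      simp [jumps_to_ancestors, jumps_to_ancestors_alt, hgo, hc, hmain.1]
    | none =>
      rw [hc] at hmain
      obtain ⟨path, stop, hwalk, hfill, hget⟩ := hmain
      simp [jumps_to_ancestors, jumps_to_ancestors_alt, hgo, hc, hwalk, hfill, hget]
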